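-- pv_equiv track=rewrite | github.com/GALJO/pythonBasics | olympiad_exercises/okiXV/ZWOJ2021/sparing2/cie/cie2.py | is_series_boring
-- ===== SOURCE A (Python) =====
-- def is_series_boring(_series):
--     _len = len(_series)
--     for _i in range(_len):
--         _dict = {_series[_i]: 1}
--         for _j in range(_i + 1, _len):
--             _dict.setdefault(_series[_j], 0)
--             _dict[_series[_j]] += 1
--             if is_boring(_dict):
--                 return True
--     return False
--
-- def is_boring(_dict):
--     _keys = list(_dict.keys())
--     for _i in range(len(_dict)):
--         if _dict[_keys[_i]] == 1:
--             return False
--     return True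
-- ===== SOURCE B (Python) =====
-- def is_series_boring(_series):
--     # For each start index, sweep right once keeping a running count of
--     # "singletons" (values occurring exactly once in the window); the window
--     # is boring as soon as that count hits zero.  O(n^2) instead of A's O(n^3).
--     n = len(_series)
--     for i in range(n):
--         counts = {}
--         singles = 0
--         for j in range(i, n):
--             x = _series[j]
--             c = counts.get(x, 0)
--             counts[x] = c + 1
--             if c == 0:
--                 singles += 1
--             elif c == 1:
--                 singles -= 1
--             if singles == 0:
--                 return True
--     return False
-- ===== Notes on version B (the rewrite author's own statement) =====
-- stated objective: faster
-- what changed: Instead of re-scanning the whole count dict after every extension (A's is_boring pass), B keeps a running counter of how many values occur exactly once in the current window, updated in O(1) per element, and reports boring when it reaches zero.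
import Mathlib
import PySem

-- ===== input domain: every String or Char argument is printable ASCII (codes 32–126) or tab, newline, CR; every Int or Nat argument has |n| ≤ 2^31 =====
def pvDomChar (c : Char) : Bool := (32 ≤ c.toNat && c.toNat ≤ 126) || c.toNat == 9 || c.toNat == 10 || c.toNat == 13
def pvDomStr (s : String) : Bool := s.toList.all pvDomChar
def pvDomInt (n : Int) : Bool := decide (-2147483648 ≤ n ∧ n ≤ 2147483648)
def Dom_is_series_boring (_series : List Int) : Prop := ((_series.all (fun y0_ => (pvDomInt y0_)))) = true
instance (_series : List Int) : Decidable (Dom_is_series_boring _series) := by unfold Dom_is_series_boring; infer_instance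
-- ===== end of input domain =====

-- B replaces A's full rescan of the count dict after every window extension by an
-- O(1)-updated running count of window singletons (O(n^2) instead of O(n^3)).

-- ===== PORT A =====
-- is_boring: scan the dict's keys, return False at the first key with value 1
def pvBoringLoop (d : PySem.Dict Int Int) : List Int → Bool
  | [] => true
  | k :: ks => if d.getD k 0 == 1 then false else pvBoringLoop d ks

def pvIsBoring (d : PySem.Dict Int Int) : Bool := pvBoringLoop d d.keys

-- inner loop over _series[_i+1:]: setdefault + += is d.modify x 0 (·+1)
def pvAInner (d : PySem.Dict Int Int) : List Int → Bool
  | [] => false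
  | x :: rest =>
      let d' := d.modify x 0 (· + 1)
      if pvIsBoring d' then true else pvAInner d' rest

-- outer loop over start indices _i, i.e. over the tails of the list
def is_series_boring : List Int → Bool
  | [] => false
  | x :: rest =>
      if pvAInner (PySem.Dict.empty.insert x 1) rest then true else is_series_boring rest

-- ===== PORT B =====
-- inner sweep: counts dict plus running number `singles` of values occurring exactly once
def pvBInner (counts : PySem.Dict Int Int) (singles : Int) : List Int → Bool
  | [] => false
  | x :: rest =>
      let c := counts.getD x 0
      let counts' := counts.insert x (c + 1)
      let singles' := if c == 0 then singles + 1 else if c == 1 then singles - 1 else singles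
      if singles' == 0 then true else pvBInner counts' singles' rest

def pvBOuter : List Int → Bool
  | [] => false
  | x :: rest =>
      if pvBInner PySem.Dict.empty 0 (x :: rest) then true else pvBOuter rest

def is_series_boring_alt (_series : List Int) : Bool := pvBOuter _series

-- ===== PRECONDITION & SPEC =====
def Spec_is_series_boring (_series : List Int) (out : Bool) : Prop := out = is_series_boring_alt _series
instance (_series : List Int) (out : Bool) : Decidable (Spec_is_series_boring _series out) := by unfold Spec_is_series_boring; infer_instance

-- ===== CLAIM (what is proved, stated in full; the proofs are below) =====
def Claim_equal_is_series_boring : Prop := ∀ (_series : List Int), Dom_is_series_boring _series → Spec_is_series_boring _series (is_series_boring _series)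

-- ===== LEMMAS AND PROOFS =====

-- number of distinct values occurring exactly once in q (each singleton occurs once, so
-- counting over q itself counts each exactly once)
def pvSingles (q : List Int) : Int := (q.countP (fun k => q.count k == 1) : Int)

theorem pvBoringLoop_eq_all (d : PySem.Dict Int Int) (ks : List Int) :
    pvBoringLoop d ks = ks.all (fun k => !(d.getD k 0 == 1)) := by
  induction ks with
  | nil => rfl
  | cons k ks ih => by_cases h : d.getD k 0 == 1 <;> simp [pvBoringLoop, h, ih]

theorem pvIsBoring_counter (q : List Int) :
    pvIsBoring (PySem.Dict.counter q) = (pvSingles q == 0) := by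
  rw [Bool.eq_iff_iff]
  simp only [pvIsBoring, pvBoringLoop_eq_all, PySem.Dict.keys_counter, PySem.Dict.getD_counter,
    List.all_eq_true, PySem.Set.mem_ofList, pvSingles, beq_iff_eq, Bool.not_eq_eq_eq_not,
    Bool.not_true, beq_eq_false_iff_ne, ne_eq, Nat.cast_eq_zero, List.countP_eq_zero,
    Nat.cast_eq_one]

theorem pvCountP_flip (P Q : Int → Bool) (x : Int) (h : ∀ k, k ≠ x → P k = Q k)
    (p : List Int) :
    (p.countP P : Int) - (if P x then (p.count x : Int) else 0)
      = (p.countP Q : Int) - (if Q x then (p.count x : Int) else 0) := by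
  induction p with
  | nil => simp
  | cons a p ih =>
    by_cases ha : a = x
    · subst ha
      by_cases hP : P a <;> by_cases hQ : Q a <;> simp_all [List.count_cons] <;> try omega
    · have hpa := h a ha
      by_cases hQa : Q a <;> by_cases hQx : Q x <;> by_cases hPx : P x <;>
        simp_all [List.count_cons] <;> try omega

theorem pvSingles_snoc (p : List Int) (x : Int) :
    pvSingles (p ++ [x]) =
      (if ((p.count x : Int)) == 0 then pvSingles p + 1
       else if ((p.count x : Int)) == 1 then pvSingles p - 1 else pvSingles p) := by
  have hc : (p ++ [x]).count x = p.count x + 1 := by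
    simp [List.count_append]
  have hflip := pvCountP_flip (fun k => p.count k == 1) (fun k => (p ++ [x]).count k == 1) x
    (by
      intro k hk
      simp [List.count_append, Ne.symm hk])
    p
  simp only [pvSingles, List.countP_append, List.countP_singleton, hc] at hflip ⊢
  by_cases h0 : p.count x = 0
  · simp only [h0] at hflip ⊢
    norm_num at hflip ⊢
    omega
  · by_cases h1 : p.count x = 1
    · simp only [h1] at hflip ⊢
      norm_num at hflip ⊢
      omega
    · have hb0 : (((p.count x : Int)) == 0) = false := by simp; omega
      have hb1 : (((p.count x : Int)) == 1) = false := by simp; omega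
      have hn1 : ((p.count x == 1)) = false := by simp [h1]
      have hn1' : ((p.count x + 1 == 1)) = false := by simp; omega
      simp only [hb0, hb1, hn1, hn1'] at hflip ⊢
      norm_num at hflip ⊢
      omega

theorem pvCounter_snoc (p : List Int) (x : Int) :
    PySem.Dict.counter (p ++ [x]) = (PySem.Dict.counter p).modify x 0 (· + 1) := by
  rw [PySem.Dict.counter_eq_foldl, PySem.Dict.counter_eq_foldl, List.foldl_append]
  rfl

theorem pvInner_eq (rest : List Int) :
    ∀ p : List Int, pvAInner (PySem.Dict.counter p) rest
      = pvBInner (PySem.Dict.counter p) (pvSingles p) rest := by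
  induction rest with
  | nil => intro p; rfl
  | cons x rest ih =>
    intro p
    have hc : (PySem.Dict.counter p).getD x 0 = (p.count x : Int) := PySem.Dict.getD_counter p x
    have hdict : (PySem.Dict.counter p).insert x ((p.count x : Int) + 1) = PySem.Dict.counter (p ++ [x]) := by
      rw [pvCounter_snoc]
      show _ = (PySem.Dict.counter p).insert x ((PySem.Dict.counter p).getD x 0 + 1)
      rw [hc]
    show (if pvIsBoring ((PySem.Dict.counter p).modify x 0 (· + 1)) then true
          else pvAInner ((PySem.Dict.counter p).modify x 0 (· + 1)) rest) = _
    rw [← pvCounter_snoc, pvIsBoring_counter]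
    simp only [pvBInner, hc, hdict, ← pvSingles_snoc]
    cases hb : (pvSingles (p ++ [x]) == 0) with
    | true => simp
    | false => simp only [Bool.false_eq_true, if_false]; exact ih (p ++ [x])

theorem pvCounter_single (x : Int) : PySem.Dict.counter [x] = PySem.Dict.empty.insert x 1 := by
  rw [PySem.Dict.counter_eq_foldl]
  show (PySem.Dict.empty.modify x 0 (· + 1)) = _
  show PySem.Dict.empty.insert x (PySem.Dict.empty.getD x 0 + 1) = _
  norm_num [PySem.Dict.getD_empty]

theorem pvSingles_single (x : Int) : pvSingles [x] = 1 := by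
  simp [pvSingles]

theorem pvOuter_eq : ∀ s : List Int, is_series_boring s = pvBOuter s := by
  intro s
  induction s with
  | nil => rfl
  | cons x rest ih =>
    show (if pvAInner (PySem.Dict.empty.insert x 1) rest then true else is_series_boring rest)
        = (if pvBInner PySem.Dict.empty 0 (x :: rest) then true else pvBOuter rest)
    have hfirst : pvBInner PySem.Dict.empty 0 (x :: rest)
        = pvBInner (PySem.Dict.counter [x]) (pvSingles [x]) rest := by
      show (let c := PySem.Dict.empty.getD x 0;
            let counts' := PySem.Dict.empty.insert x (c + 1);
            let singles' := if c == 0 then (0:Int) + 1 else if c == 1 then 0 - 1 else 0;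
            if singles' == 0 then true else pvBInner counts' singles' rest) = _
      rw [pvCounter_single, pvSingles_single]
      norm_num [PySem.Dict.getD_empty]
    rw [hfirst, ← pvInner_eq, pvCounter_single, ih]

-- ===== VERDICT (by name: the statement is the Claim_ definition above) =====
theorem is_series_boring_spec : Claim_equal_is_series_boring := by
  intro s _
  exact pvOuter_eq s
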